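-- pv_equiv track=rewrite | github.com/ClearAnatomics/ClearMap | ClearMap/Utils/tag_expression.py | escape_glob
-- ===== SOURCE A (Python) =====
-- def escape_glob(string):
--     e = ''
--     for c in string:
--         if c in '?[]':
--             e += f'[{c}]'
--         else:
--             e += c
--     return e
-- ===== SOURCE B (Python) =====
-- def escape_glob(string):
--     return '[[]'.join(
--         '[]]'.join(
--             '[?]'.join(piece.split('?'))
--             for piece in chunk.split(']')
--         )
--         for chunk in string.split('[')
--     )
-- ===== Notes on version B (the rewrite author's own statement) =====
-- stated objective: alternative
-- what changed: Replaces the per-character branch-and-concatenate loop with three staged split/join passes: the string is split on each glob metacharacter in turn and rejoined with that character's bracket-escaped form, so no explicit per-character test or accumulator remains.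
import Mathlib
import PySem

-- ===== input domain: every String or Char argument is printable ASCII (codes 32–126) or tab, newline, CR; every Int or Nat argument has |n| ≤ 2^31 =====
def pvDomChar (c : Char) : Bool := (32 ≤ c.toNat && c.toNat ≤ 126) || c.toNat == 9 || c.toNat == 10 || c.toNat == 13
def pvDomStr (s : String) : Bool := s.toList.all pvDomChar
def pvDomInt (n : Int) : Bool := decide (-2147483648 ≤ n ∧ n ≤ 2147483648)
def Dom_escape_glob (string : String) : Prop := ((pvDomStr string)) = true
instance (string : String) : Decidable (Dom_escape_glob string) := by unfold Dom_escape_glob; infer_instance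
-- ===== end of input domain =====

-- B replaces A's per-character branch-and-concatenate loop with three staged split/join passes (alternative decomposition, same cost).


-- ===== PORT A =====
-- literal port of A: e = ''; for c in string: e += '[' + c + ']' if c in '?[]' else c
def escape_glob (string : String) : String :=
  string.toList.foldl
    (fun e c =>
      if c = '?' ∨ c = '[' ∨ c = ']' then
        e ++ String.ofList ['['] ++ String.ofList [c] ++ String.ofList [']']
      else
        e ++ String.ofList [c])
    ""

-- ===== PORT B =====
-- literal port of Source B's three staged split/join passes; str.split(sep) for the
-- non-empty literal separators is PySem.Chars.splitOn (the sep ≠ "" form of split?)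
def escape_glob_alt (string : String) : String :=
  String.ofList
    (PySem.Chars.join "[[]".toList
      ((PySem.Chars.splitOn string.toList ['[']).map fun chunk =>
        PySem.Chars.join "[]]".toList
          ((PySem.Chars.splitOn chunk [']']).map fun piece =>
            PySem.Chars.join "[?]".toList (PySem.Chars.splitOn piece ['?']))))

-- ===== PRECONDITION & SPEC =====
def Spec_escape_glob (string : String) (out : String) : Prop := out = escape_glob_alt string
instance (string : String) (out : String) : Decidable (Spec_escape_glob string out) := by unfold Spec_escape_glob; infer_instance

-- ===== CLAIM (what is proved, stated in full; the proofs are below) =====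
def Claim_equal_escape_glob : Prop := ∀ (string : String), Dom_escape_glob string → Spec_escape_glob string (escape_glob string)

-- ===== LEMMAS AND PROOFS =====

-- the single-character escape table both proofs reduce to
def pvEsc (c : Char) : List Char :=
  if c = '[' then "[[]".toList
  else if c = ']' then "[]]".toList
  else if c = '?' then "[?]".toList
  else [c]

-- A's loop over any accumulator appends exactly the per-character escapes
theorem escape_glob_foldl (l : List Char) (e : String) :
    (l.foldl
      (fun e c =>
        if c = '?' ∨ c = '[' ∨ c = ']' then
          e ++ String.ofList ['['] ++ String.ofList [c] ++ String.ofList [']']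
        else e ++ String.ofList [c]) e).toList
    = e.toList ++ l.flatMap pvEsc := by
  induction l generalizing e with
  | nil => simp
  | cons c l ih =>
    rw [List.foldl_cons, ih, List.flatMap_cons, ← List.append_assoc]
    congr 1
    by_cases h1 : c = '?'
    · subst h1; simp [pvEsc]
    · by_cases h2 : c = '['
      · subst h2; simp [pvEsc]
      · by_cases h3 : c = ']'
        · subst h3; simp [pvEsc]
        · simp [pvEsc, h1, h2, h3]

-- PySem's fuel-based splitOn.go computed: it is Mathlib's splitOnP under the accumulators
theorem splitOn_go_spec (c : Char) :
    ∀ (fuel : Nat) (l cur : List Char) (acc : List (List Char)), l.length < fuel →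
      PySem.Chars.splitOn.go [c] fuel l cur acc
        = acc.reverse ++ (List.splitOnP (· == c) l).modifyHead (cur.reverse ++ ·) := by
  intro fuel
  induction fuel with
  | zero => intro l cur acc h; omega
  | succ fuel ih =>
    intro l cur acc h
    cases l with
    | nil =>
      rw [PySem.Chars.splitOn.go.eq_def]
      simp [List.splitOnP_nil]
    | cons x rest =>
      rw [PySem.Chars.splitOn.go.eq_def]
      simp only []
      by_cases hx : c = x
      · subst hx
        have hp : [c].isPrefixOf (c :: rest) = true := by simp [List.isPrefixOf]
        rw [hp, if_pos rfl]
        rw [show List.drop [c].length (c :: rest) = rest from rfl]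
        rw [ih rest [] (cur.reverse :: acc) (by simpa using Nat.lt_of_succ_lt_succ h)]
        rw [List.splitOnP_cons]
        cases List.splitOnP (· == c) rest <;> simp
      · have hp : [c].isPrefixOf (x :: rest) = false := by
          simp [List.isPrefixOf]; exact hx
        rw [hp]
        simp only [Bool.false_eq_true, if_false]
        rw [ih rest (x :: cur) acc (by simpa using Nat.lt_of_succ_lt_succ h)]
        rw [List.splitOnP_cons]
        have hx' : (x == c) = false := by simp; exact fun e => hx e.symm
        rw [hx']
        simp only [Bool.false_eq_true, if_false]
        cases hsp : List.splitOnP (· == c) rest with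
        | nil => simp
        | cons q qs => simp

theorem splitOn_single (c : Char) (l : List Char) :
    PySem.Chars.splitOn l [c] = List.splitOnP (· == c) l := by
  rw [PySem.Chars.splitOn, splitOn_go_spec c (l.length + 1) l [] [] (Nat.lt_succ_self _)]
  cases hsp : List.splitOnP (· == c) l with
  | nil => simp
  | cons q qs => simp

-- intercalate over a cons as one flatMap
theorem intercalate_cons_flat (r a : List Char) (bs : List (List Char)) :
    List.intercalate r (a :: bs) = a ++ bs.flatMap (fun b => r ++ b) := by
  induction bs generalizing a with
  | nil => simp [List.intercalate]
  | cons b bs ih =>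
    have h2 : List.intercalate r (a :: b :: bs) = a ++ r ++ List.intercalate r (b :: bs) := by
      simp [List.intercalate, List.intersperse]
    rw [h2, ih b, List.flatMap_cons]
    simp [List.append_assoc]

-- joining the flatMap-mapped pieces of a single-char split is one flatMap over the string
theorem join_map_splitOnP (c : Char) (r : List Char) (g : Char → List Char) (l : List Char) :
    List.intercalate r ((List.splitOnP (· == c) l).map (fun p => p.flatMap g))
      = l.flatMap (fun x => if x = c then r else g x) := by
  induction l with
  | nil => simp [List.splitOnP_nil, List.intercalate]
  | cons x rest ih =>
    rw [List.splitOnP_cons, List.flatMap_cons]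
    rcases hsp : List.splitOnP (· == c) rest with _ | ⟨q, qs⟩
    · exact absurd hsp (List.splitOnP_ne_nil _ _)
    · rw [hsp] at ih
      rw [List.map_cons, intercalate_cons_flat] at ih
      by_cases hx : x = c
      · subst hx
        rw [if_pos rfl, BEq.rfl, if_pos rfl]
        simp only [List.map_cons, List.flatMap_nil]
        rw [intercalate_cons_flat, List.flatMap_cons, List.nil_append, List.append_assoc, ih]
      · have hx' : (x == c) = false := by simp [hx]
        rw [hx']
        simp only [Bool.false_eq_true, if_false, List.modifyHead_cons, List.map_cons,
          hx, if_false]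
        rw [intercalate_cons_flat, List.flatMap_cons, List.append_assoc, ih]

-- ===== VERDICT (by name: the statement is the Claim_ definition above) =====
theorem escape_glob_spec : Claim_equal_escape_glob := by
  intro s _
  unfold Spec_escape_glob escape_glob escape_glob_alt
  apply String.ext
  rw [String.toList_ofList, escape_glob_foldl s.toList ""]
  have inner : ∀ piece : List Char,
      PySem.Chars.join "[?]".toList (PySem.Chars.splitOn piece ['?'])
        = piece.flatMap (fun x => if x = '?' then "[?]".toList else [x]) := by
    intro piece
    have h := join_map_splitOnP '?' "[?]".toList (fun x => [x]) piece
    simpa [PySem.Chars.join, splitOn_single] using h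
  have middle : ∀ chunk : List Char,
      PySem.Chars.join "[]]".toList
          ((PySem.Chars.splitOn chunk [']']).map fun piece =>
            PySem.Chars.join "[?]".toList (PySem.Chars.splitOn piece ['?']))
        = chunk.flatMap (fun x => if x = ']' then "[]]".toList
            else if x = '?' then "[?]".toList else [x]) := by
    intro chunk
    have h := join_map_splitOnP ']' "[]]".toList
      (fun x => if x = '?' then "[?]".toList else [x]) chunk
    rw [PySem.Chars.join, splitOn_single,
      List.map_congr_left (fun p _ => inner p)]
    exact h
  rw [List.map_congr_left (fun p _ => middle p),
    PySem.Chars.join, splitOn_single,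
    join_map_splitOnP '[' "[[]".toList
      (fun x => if x = ']' then "[]]".toList else if x = '?' then "[?]".toList else [x]) s.toList]
  rw [show ("" : String).toList = [] from rfl, List.nil_append,
    show pvEsc = (fun x => if x = '[' then "[[]".toList else if x = ']' then "[]]".toList
      else if x = '?' then "[?]".toList else [x]) from funext fun _ => rfl]
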